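-- pv_equiv track=rewrite | github.com/MirageModi/MedSAE | analysis/reranking_retrieval.py | resolve_sense
-- ===== SOURCE A (Python) =====
-- SENSE_TO_NER_MAP = {
--     "administrative": ["administrative healthcare event", "medical procedure or intervention"],
--     "clinical": ["bodily fluid or secretion", "clinical finding or symptom"],
--     "radiological": ["radiological finding or shadow", "anatomical structure"],
--     "anatomical": ["anatomical structure"],
--     "dermatological": ["dermatological or skin lesion"],
--     "pathological": ["clinical finding or symptom", "dermatological or skin lesion", "radiological finding or shadow", "anatomical structure"],
--     "cardiac": ["cardiovascular disorder", "medical procedure or intervention"],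
--     "cardiovascular": ["cardiovascular disorder", "medical procedure or intervention"],
--     "GI": ["gastrointestinal disorder", "clinical finding or symptom"],
--     "neurological": ["neurological or mental disorder", "medical procedure or intervention"],
--     "psychological": ["neurological or mental disorder"],
--     "respiratory": ["respiratory or pulmonary disorder", "medical procedure or intervention"],
--     "orthopedic": ["musculoskeletal or orthopedic disorder", "medical procedure or intervention"],
--     "renal": ["renal or kidney disorder", "laboratory measurement"],
--     "endocrine": ["endocrine disorder", "laboratory measurement"],
--     "surgical": ["medical procedure or intervention"],
--     "therapeutic": ["medication or therapeutic agent"],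
-- }
--
-- def resolve_sense(ner_label, valid_senses):
--     if not ner_label:
--         return None
--     ner_label = ner_label.lower().strip()
--     # Sort senses for deterministic ordering
--     for sense in sorted(valid_senses):
--         for expected in SENSE_TO_NER_MAP.get(sense, [sense]):
--             if ner_label == expected.lower():
--                 return sense
--     return None
-- ===== SOURCE B (Python) =====
-- SENSE_TO_NER_MAP = {
--     "administrative": ["administrative healthcare event", "medical procedure or intervention"],
--     "clinical": ["bodily fluid or secretion", "clinical finding or symptom"],
--     "radiological": ["radiological finding or shadow", "anatomical structure"],
--     "anatomical": ["anatomical structure"],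
--     "dermatological": ["dermatological or skin lesion"],
--     "pathological": ["clinical finding or symptom", "dermatological or skin lesion", "radiological finding or shadow", "anatomical structure"],
--     "cardiac": ["cardiovascular disorder", "medical procedure or intervention"],
--     "cardiovascular": ["cardiovascular disorder", "medical procedure or intervention"],
--     "GI": ["gastrointestinal disorder", "clinical finding or symptom"],
--     "neurological": ["neurological or mental disorder", "medical procedure or intervention"],
--     "psychological": ["neurological or mental disorder"],
--     "respiratory": ["respiratory or pulmonary disorder", "medical procedure or intervention"],
--     "orthopedic": ["musculoskeletal or orthopedic disorder", "medical procedure or intervention"],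
--     "renal": ["renal or kidney disorder", "laboratory measurement"],
--     "endocrine": ["endocrine disorder", "laboratory measurement"],
--     "surgical": ["medical procedure or intervention"],
--     "therapeutic": ["medication or therapeutic agent"],
-- }
--
-- # Reverse index built once: lowered NER label -> set of senses expecting it.
-- _REV = {}
-- for _sense, _labels in SENSE_TO_NER_MAP.items():
--     for _lab in _labels:
--         _REV.setdefault(_lab.lower(), set()).add(_sense)
--
-- def resolve_sense(ner_label, valid_senses):
--     if not ner_label:
--         return None
--     key = ner_label.lower().strip()
--     matches = [s for s in valid_senses
--                if (s in _REV.get(key, ()) if s in SENSE_TO_NER_MAP else s.lower() == key)]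
--     return min(matches) if matches else None
-- ===== Notes on version B (the rewrite author's own statement) =====
-- stated objective: simpler
-- what changed: Replaces the sorted-scan with nested short-circuit loops by a precomputed reverse index (lowered label -> set of senses) plus a single filter of valid_senses and min() of the matches.
import Mathlib
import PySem

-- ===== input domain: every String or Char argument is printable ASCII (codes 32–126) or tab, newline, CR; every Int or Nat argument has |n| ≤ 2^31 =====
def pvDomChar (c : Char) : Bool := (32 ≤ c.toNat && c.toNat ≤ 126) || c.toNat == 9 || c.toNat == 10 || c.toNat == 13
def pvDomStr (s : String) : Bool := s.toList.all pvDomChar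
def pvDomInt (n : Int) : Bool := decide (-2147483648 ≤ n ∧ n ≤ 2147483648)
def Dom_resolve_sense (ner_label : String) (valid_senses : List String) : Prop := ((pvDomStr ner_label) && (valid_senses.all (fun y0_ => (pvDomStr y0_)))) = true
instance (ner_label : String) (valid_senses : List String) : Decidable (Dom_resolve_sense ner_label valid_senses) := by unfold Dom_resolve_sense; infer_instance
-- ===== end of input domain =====

-- B replaces A's sorted scan with nested short-circuit loops by a precomputed
-- reverse index (lowered label -> set of senses) plus one filter and a min (objective: simpler).

-- ===== PORT A =====
def senseToNerMap : PySem.Dict String (List String) := PySem.Dict.ofList [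
  ("administrative", ["administrative healthcare event", "medical procedure or intervention"]),
  ("clinical", ["bodily fluid or secretion", "clinical finding or symptom"]),
  ("radiological", ["radiological finding or shadow", "anatomical structure"]),
  ("anatomical", ["anatomical structure"]),
  ("dermatological", ["dermatological or skin lesion"]),
  ("pathological", ["clinical finding or symptom", "dermatological or skin lesion", "radiological finding or shadow", "anatomical structure"]),
  ("cardiac", ["cardiovascular disorder", "medical procedure or intervention"]),
  ("cardiovascular", ["cardiovascular disorder", "medical procedure or intervention"]),
  ("GI", ["gastrointestinal disorder", "clinical finding or symptom"]),
  ("neurological", ["neurological or mental disorder", "medical procedure or intervention"]),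
  ("psychological", ["neurological or mental disorder"]),
  ("respiratory", ["respiratory or pulmonary disorder", "medical procedure or intervention"]),
  ("orthopedic", ["musculoskeletal or orthopedic disorder", "medical procedure or intervention"]),
  ("renal", ["renal or kidney disorder", "laboratory measurement"]),
  ("endocrine", ["endocrine disorder", "laboratory measurement"]),
  ("surgical", ["medical procedure or intervention"]),
  ("therapeutic", ["medication or therapeutic agent"])]

-- inner 'for expected in …: if ner_label == expected.lower(): return sense' loop
def innerLoopA (lab : String) : List String → Bool
  | [] => false
  | e :: es => if lab = PySem.Str.lower e then true else innerLoopA lab es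

-- outer 'for sense in sorted(valid_senses)' loop with early return
def outerLoopA (lab : String) : List String → Option String
  | [] => none
  | s :: rest => if innerLoopA lab (senseToNerMap.getD s [s]) then some s else outerLoopA lab rest

def resolve_sense (ner_label : String) (valid_senses : List String) : Option String :=
  if ner_label = "" then none
  else outerLoopA (PySem.Str.strip (PySem.Str.lower ner_label))
        (PySem.List.sorted valid_senses (fun x => x) false)

-- ===== PORT B =====
-- module-level reverse index: lowered expected label -> set of senses
def revIndex : PySem.Dict String (PySem.Set String) :=
  senseToNerMap.items.foldl (fun d p =>
    p.2.foldl (fun d lab =>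
      let k := PySem.Str.lower lab
      d.insert k (PySem.Set.add (d.getD k PySem.Set.empty) p.1)) d) PySem.Dict.empty

-- the comprehension's condition
def matchB (key s : String) : Bool :=
  if senseToNerMap.contains s then PySem.Set.contains (revIndex.getD key PySem.Set.empty) s
  else PySem.Str.lower s == key

def resolve_sense_alt (ner_label : String) (valid_senses : List String) : Option String :=
  if ner_label = "" then none
  else
    let key := PySem.Str.strip (PySem.Str.lower ner_label)
    let hits := valid_senses.filter (matchB key)
    PySem.List.min? hits (fun x => x)

-- ===== PRECONDITION & SPEC =====
def Spec_resolve_sense (ner_label : String) (valid_senses : List String) (out : Option String) : Prop := out = resolve_sense_alt ner_label valid_senses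
instance (ner_label : String) (valid_senses : List String) (out : Option String) : Decidable (Spec_resolve_sense ner_label valid_senses out) := by unfold Spec_resolve_sense; infer_instance

-- ===== CLAIM (what is proved, stated in full; the proofs are below) =====
def Claim_equal_resolve_sense : Prop := ∀ (ner_label : String) (valid_senses : List String), Dom_resolve_sense ner_label valid_senses → Spec_resolve_sense ner_label valid_senses (resolve_sense ner_label valid_senses)

-- ===== LEMMAS AND PROOFS =====


-- Bool membership after Set.add
theorem set_contains_add (t : PySem.Set String) (x y : String) :
    PySem.Set.contains (PySem.Set.add t x) y = (PySem.Set.contains t y || y == x) := by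
  cases hxy : (y == x) with
  | true =>
    have hyx : y = x := by simpa using hxy
    subst hyx
    simp only [PySem.Set.contains, PySem.Set.add, Bool.or_true]
    split
    · assumption
    · simp [List.contains_eq_mem]
  | false =>
    have hyx : y ≠ x := by simpa using hxy
    simp only [PySem.Set.contains, PySem.Set.add, Bool.or_false]
    split
    · rfl
    · simp [List.contains_eq_mem, hyx]

-- membership in the set at `key` after the inner label loop of one sense x
theorem revInner (key s x : String) (labs : List String)
    (d : PySem.Dict String (PySem.Set String)) :
    PySem.Set.contains ((labs.foldl (fun d lab =>
        let k := PySem.Str.lower lab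
        d.insert k (PySem.Set.add (d.getD k PySem.Set.empty) x)) d).getD key PySem.Set.empty) s
      = (PySem.Set.contains (d.getD key PySem.Set.empty) s
         || (s == x && labs.any (fun e => PySem.Str.lower e == key))) := by
  induction labs generalizing d with
  | nil => simp
  | cons e es ih =>
    simp only [List.foldl_cons, List.any_cons]
    rw [ih]
    by_cases hk : key = PySem.Str.lower e
    · subst hk
      rw [PySem.Dict.getD_insert, if_pos rfl, set_contains_add]
      have hbeq : (PySem.Str.lower e == PySem.Str.lower e) = true := by simp
      rw [hbeq]
      cases PySem.Set.contains (d.getD (PySem.Str.lower e) PySem.Set.empty) s <;>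
        cases hsx : (s == x) <;> simp
    · rw [PySem.Dict.getD_insert]
      have hbeq : (PySem.Str.lower e == key) = false := by
        simpa using fun h => hk h.symm
      simp [hk, hbeq]

-- membership in the set at `key` after the whole reverse-index build loop
theorem revOuter (key s : String) (ps : List (String × List String))
    (d : PySem.Dict String (PySem.Set String)) :
    PySem.Set.contains ((ps.foldl (fun d p =>
        p.2.foldl (fun d lab =>
          let k := PySem.Str.lower lab
          d.insert k (PySem.Set.add (d.getD k PySem.Set.empty) p.1)) d) d).getD key PySem.Set.empty) s
      = (PySem.Set.contains (d.getD key PySem.Set.empty) s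
         || ps.any (fun p => s == p.1 && p.2.any (fun e => PySem.Str.lower e == key))) := by
  induction ps generalizing d with
  | nil => simp
  | cons p rest ih =>
    simp only [List.foldl_cons, List.any_cons]
    rw [ih, revInner, Bool.or_assoc]

theorem revIndex_contains (key s : String) :
    PySem.Set.contains (revIndex.getD key PySem.Set.empty) s
      = senseToNerMap.items.any (fun p => s == p.1 && p.2.any (fun e => PySem.Str.lower e == key)) := by
  unfold revIndex
  rw [revOuter]
  simp [PySem.Dict.empty, PySem.Dict.getD, PySem.Dict.get?, PySem.Set.contains, PySem.Set.empty]

-- scanning an assoc list with distinct keys for key s = looking it up first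
theorem any_key_find? (q : String × List String → Bool) (ps : List (String × List String))
    (hnd : (ps.map (fun p => p.1)).Nodup) (s : String) :
    ps.any (fun p => s == p.1 && q p) = ((ps.find? (fun p => p.1 == s)).map q).getD false := by
  induction ps with
  | nil => simp
  | cons p rest ih =>
    simp only [List.map_cons, List.nodup_cons] at hnd
    simp only [List.any_cons, List.find?_cons]
    by_cases hk : p.1 = s
    · have h1 : (s == p.1) = true := by simp [hk]
      have h2 : (p.1 == s) = true := by simp [hk]
      rw [h1, h2]
      have hrest : rest.any (fun p' => s == p'.1 && q p') = false := by
        rw [List.any_eq_false]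
        intro p' hp'
        have : p'.1 ≠ s := by
          intro he
          exact hnd.1 (by rw [← hk] at he; exact he ▸ List.mem_map_of_mem hp')
        simp [Ne.symm this]
      simp [hrest]
    · have h1 : (s == p.1) = false := by simpa using fun h => hk h.symm
      have h2 : (p.1 == s) = false := by simpa using hk
      rw [h1, h2]
      simp only [Bool.false_and, Bool.false_or]
      exact ih hnd.2

theorem innerLoopA_eq_any (key : String) (es : List String) :
    innerLoopA key es = es.any (fun e => PySem.Str.lower e == key) := by
  induction es with
  | nil => rfl
  | cons e t ih =>
    simp only [innerLoopA, List.any_cons, ← ih]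
    by_cases h : key = PySem.Str.lower e
    · simp [h]
    · have : (PySem.Str.lower e == key) = false := by simpa using fun he => h he.symm
      simp [h, this]

theorem senseMap_keys_nodup : (senseToNerMap.items.map (fun p => p.1)).Nodup := by
  have h := PySem.Dict.nodup_keys_ofList (κ := String) (ν := List String)
  decide

-- the two per-sense conditions agree
theorem matchB_eq (key s : String) :
    innerLoopA key (senseToNerMap.getD s [s]) = matchB key s := by
  rw [matchB, revIndex_contains,
    any_key_find? (fun p => p.2.any (fun e => PySem.Str.lower e == key)) _ senseMap_keys_nodup s]
  cases hf : senseToNerMap.items.find? (fun p => p.1 == s) with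
  | none =>
    have hg : senseToNerMap.get? s = none := by simp [PySem.Dict.get?, hf]
    have hc : senseToNerMap.contains s = false := by
      rw [PySem.Dict.contains_eq_isSome_get?, hg]; rfl
    rw [hc, PySem.Dict.getD_of_get?_eq_none _ _ hg]
    by_cases h : key = PySem.Str.lower s
    · simp [innerLoopA, h]
    · have hb : (PySem.Str.lower s == key) = false := by simpa using fun he => h he.symm
      simp [innerLoopA, h, hb]
  | some p =>
    have hg : senseToNerMap.get? s = some p.2 := by simp [PySem.Dict.get?, hf]
    have hc : senseToNerMap.contains s = true := by
      rw [PySem.Dict.contains_eq_isSome_get?, hg]; rfl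
    rw [hc, PySem.Dict.getD_eq_get?_getD, hg, innerLoopA_eq_any]
    simp

-- outer loop is find?
theorem outerLoopA_eq_find? (lab : String) (ys : List String) :
    outerLoopA lab ys = ys.find? (fun s => innerLoopA lab (senseToNerMap.getD s [s])) := by
  induction ys with
  | nil => rfl
  | cons s rest ih => simp [outerLoopA, List.find?]; split <;> simp_all

-- on a ≤-sorted list, the first hit is a lower bound of all hits
theorem find?_pairwise_le {a : String} {p : String → Bool} {ys : List String}
    (hpw : ys.Pairwise (· ≤ ·)) (h : ys.find? p = some a) :
    ∀ y ∈ ys, p y = true → a ≤ y := by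
  induction ys with
  | nil => simp at h
  | cons b t ih =>
    rw [List.find?_cons] at h
    rcases List.pairwise_cons.mp hpw with ⟨hb, ht⟩
    by_cases hpb : p b = true
    · simp [hpb] at h
      subst h
      intro y hy _
      rcases List.mem_cons.mp hy with h | h
      · exact le_of_eq h.symm
      · exact hb y h
    · simp [hpb] at h
      intro y hy hpy
      rcases List.mem_cons.mp hy with h2 | h2
      · subst h2; exact absurd hpy hpb
      · exact ih ht h y h2 hpy

-- first match on the sorted list = minimum of all matches
theorem find?_sorted_eq_min?_filter (xs : List String) (p : String → Bool) :
    (PySem.List.sorted xs (fun x => x) false).find? p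
      = PySem.List.min? (xs.filter p) (fun x => x) := by
  have hperm : (PySem.List.sorted xs (fun x => x) false).Perm xs := PySem.List.sorted_perm ..
  have hpw : (PySem.List.sorted xs (fun x => x) false).Pairwise (· ≤ ·) :=
    PySem.List.sorted_pairwise ..
  cases h : (PySem.List.sorted xs (fun x => x) false).find? p with
  | none =>
    have hnone := List.find?_eq_none.mp h
    have : xs.filter p = [] := by
      apply List.filter_eq_nil_iff.mpr
      intro y hy
      simpa using hnone y (hperm.mem_iff.mpr hy)
    rw [this]
    exact ((PySem.List.min?_eq_none_iff _ _).mpr rfl).symm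
  | some a =>
    have hpa : p a = true := List.find?_some h
    have hamem : a ∈ xs := hperm.mem_iff.mp (List.mem_of_find?_eq_some h)
    have hafil : a ∈ xs.filter p := List.mem_filter.mpr ⟨hamem, hpa⟩
    cases hm : PySem.List.min? (xs.filter p) (fun x => x) with
    | none =>
      rw [PySem.List.min?_eq_none_iff _ _] at hm
      rw [hm] at hafil; simp at hafil
    | some m =>
      have hmmem := PySem.List.min?_mem hm
      have hmin := PySem.List.min?_isMin hm
      have hpm : p m = true := (List.mem_filter.mp hmmem).2
      have hmxs : m ∈ xs := (List.mem_filter.mp hmmem).1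
      have ham : a ≤ m :=
        find?_pairwise_le hpw h m (hperm.mem_iff.mpr hmxs) hpm
      have hma : m ≤ a := hmin a hafil
      exact congrArg some (le_antisymm ham hma)

-- ===== VERDICT (by name: the statement is the Claim_ definition above) =====
theorem resolve_sense_spec : Claim_equal_resolve_sense := by
  intro ner_label valid_senses _
  unfold Spec_resolve_sense resolve_sense resolve_sense_alt
  split
  · rfl
  · rw [outerLoopA_eq_find?]
    have : (fun s => innerLoopA (PySem.Str.strip (PySem.Str.lower ner_label)) (senseToNerMap.getD s [s]))
        = matchB (PySem.Str.strip (PySem.Str.lower ner_label)) := by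
      funext s; exact matchB_eq _ s
    rw [this]
    exact find?_sorted_eq_min?_filter valid_senses _
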